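-- pv_equiv track=rewrite | github.com/heohak/python | TK/tk5/exam.py | word_numeration
-- ===== SOURCE A (Python) =====
-- def word_numeration(words: list) -> list:
--     """
--     For a given list of string, add numeration for every string.
--
--     The input list consists of strings. For every element in the input list,
--     the output list adds a numeration after the string.
--     The format is as follows: #N, where N starts from 1.
--     String comparison should be case-insensitive.
--     The case of symbols in string itself in output list should remain the same as in input list.
--
--     The output list has the same amount of elements as the input list.
--     For every element in the output list, "#N" is added, where N = 1, 2, 3, ...
--
--     word_numeration(["tere", "tere", "tulemast"]) => ["tere#1", "tere#2", "tulemast#1"]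
--     word_numeration(["Tere", "tere", "tulemast"]) => ["Tere#1", "tere#2", "tulemast#1"]
--     word_numeration(["Tere", "tere", "tulemast", "no", "tere", "TERE"]) => ["Tere#1", "tere#2", "tulemast#1", "no#1", "tere#3", "TERE#4"]
--
--     :param words: A list of strings.
--     :return: List of string with numeration.
--     """
--     numeration = {}
--     result =[]
--     # Iterate through the words and add the numeration to the dictionary
--     for word in words:
--         lower_word = word.lower()
--         if lower_word in numeration:
--             numeration[lower_word] += 1
--             result.append(word + "#" + str(numeration[lower_word]))
--         else:
--             numeration[lower_word] = 1
--             result.append(f"{word}#{numeration[lower_word]}")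
--     return result
-- ===== SOURCE B (Python) =====
-- def word_numeration(words: list) -> list:
--     """Number each word case-insensitively by rescanning the prefix of lowercased words."""
--     lowers = [w.lower() for w in words]
--     return [f"{words[i]}#{lowers[:i + 1].count(lowers[i])}" for i in range(len(words))]
-- ===== Notes on version B (the rewrite author's own statement) =====
-- stated objective: simpler
-- what changed: drops the incrementally maintained dict counter: B precomputes the lowercased list once and reads each word's occurrence number directly as a count over the prefix lowers[:i+1], a two-line comprehension with no mutable dictionary state
import Mathlib
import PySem

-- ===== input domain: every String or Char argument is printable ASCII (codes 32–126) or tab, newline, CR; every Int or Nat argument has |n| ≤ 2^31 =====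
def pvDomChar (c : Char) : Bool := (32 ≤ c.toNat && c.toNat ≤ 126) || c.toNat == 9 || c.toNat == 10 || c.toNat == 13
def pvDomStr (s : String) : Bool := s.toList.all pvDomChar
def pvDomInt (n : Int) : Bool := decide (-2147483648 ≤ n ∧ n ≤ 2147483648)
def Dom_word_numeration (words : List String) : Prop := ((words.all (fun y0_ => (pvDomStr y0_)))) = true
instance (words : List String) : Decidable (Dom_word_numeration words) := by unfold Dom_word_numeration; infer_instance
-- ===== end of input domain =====

-- B replaces A's incrementally maintained dict counter with per-index prefix scans of a
-- precomputed lowercased list (simpler, no mutable dictionary state; O(n^2) vs A's O(n)).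


-- ===== PORT A =====
-- dict numeration → PySem.Dict String Int; 'numeration[lw] += 1' = insert lw (getD lw 0 + 1)
-- (the key is present in that branch); result accumulated by appending.
def word_numeration (words : List String) : List String :=
  (words.foldl
    (fun (st : PySem.Dict String Int × List String) word =>
      let lw := PySem.Str.lower word
      if st.1.contains lw then
        let n := st.1.getD lw 0 + 1
        (st.1.insert lw n, st.2 ++ [PySem.Str.join "" [word, "#", PySem.Int.toStr n]])
      else
        (st.1.insert lw 1, st.2 ++ [PySem.Str.join "" [word, "#", PySem.Int.toStr 1]]))
    (PySem.Dict.empty, [])).2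

-- ===== PORT B =====
-- lowers = [w.lower() for w in words]; entry i = f"{words[i]}#{lowers[:i+1].count(lowers[i])}"
def word_numeration_alt (words : List String) : List String :=
  let lowers := words.map PySem.Str.lower
  (PySem.List.pyRange 0 (PySem.List.len words)).map (fun i =>
    PySem.Str.join "" [PySem.List.pyGetD words i "", "#",
      PySem.Int.toStr
        ((PySem.List.count (PySem.List.slice lowers none (some (i + 1)))
            (PySem.List.pyGetD lowers i "") : Int))])

-- ===== PRECONDITION & SPEC =====
def Spec_word_numeration (words : List String) (out : List String) : Prop := out = word_numeration_alt words
instance (words : List String) (out : List String) : Decidable (Spec_word_numeration words out) := by unfold Spec_word_numeration; infer_instance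

-- ===== CLAIM (what is proved, stated in full; the proofs are below) =====
def Claim_equal_word_numeration : Prop := ∀ (words : List String), Dom_word_numeration words → Spec_word_numeration words (word_numeration words)

-- ===== LEMMAS AND PROOFS =====

-- Common specification: numbering of `rest` given the lowercased, already-processed prefix `plows`.
def pvSpecNum (plows : List String) : List String → List String
  | [] => []
  | w :: ws =>
    let lw := PySem.Str.lower w
    PySem.Str.join "" [w, "#", PySem.Int.toStr ((List.count lw plows : Int) + 1)]
      :: pvSpecNum (plows ++ [lw]) ws

theorem pv_insert_counter {α : Type} [BEq α] [LawfulBEq α] (xs : List α) (x : α) :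
    (PySem.Dict.counter xs).insert x ((List.count x xs : Int) + 1)
      = PySem.Dict.counter (xs ++ [x]) := by
  rw [← PySem.Dict.getD_counter,
      ← PySem.Dict.foldl_insert_getD_add_one_eq_counter,
      ← PySem.Dict.foldl_insert_getD_add_one_eq_counter (xs ++ [x])]
  simp [List.foldl_append]

theorem pv_A_inv (rest plows acc :
    List String) :
    (rest.foldl
      (fun (st : PySem.Dict String Int × List String) word =>
        let lw := PySem.Str.lower word
        if st.1.contains lw then
          let n := st.1.getD lw 0 + 1
          (st.1.insert lw n, st.2 ++ [PySem.Str.join "" [word, "#", PySem.Int.toStr n]])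
        else
          (st.1.insert lw 1, st.2 ++ [PySem.Str.join "" [word, "#", PySem.Int.toStr 1]]))
      (PySem.Dict.counter plows, acc)).2 = acc ++ pvSpecNum plows rest := by
  induction rest generalizing plows acc with
  | nil => simp [pvSpecNum]
  | cons w ws ih =>
    simp only [List.foldl_cons, pvSpecNum]
    by_cases h : (PySem.Dict.counter plows).contains (PySem.Str.lower w)
    · rw [if_pos h]
      simp only [PySem.Dict.getD_counter]
      rw [pv_insert_counter, ih]
      simp
    · rw [if_neg h]
      have hc : List.count (PySem.Str.lower w) plows = 0 := by
        rw [PySem.Dict.contains_counter] at h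
        simp only [List.contains_eq_mem, decide_eq_true_eq] at h
        exact List.count_eq_zero.mpr (by simpa using h)
      have hins : (PySem.Dict.counter plows).insert (PySem.Str.lower w) 1
          = PySem.Dict.counter (plows ++ [PySem.Str.lower w]) := by
        simpa [hc] using pv_insert_counter plows (PySem.Str.lower w)
      rw [hins, ih]
      simp [hc]

theorem pv_B_inv (ws plows : List String) :
    (List.range ws.length).map (fun i =>
      PySem.Str.join "" [ws.getD i "", "#",
        PySem.Int.toStr
          ((List.count ((ws.map PySem.Str.lower).getD i "") plows : Int) +
           (List.count ((ws.map PySem.Str.lower).getD i "")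
              ((ws.map PySem.Str.lower).take (i + 1)) : Int))])
      = pvSpecNum plows ws := by
  induction ws generalizing plows with
  | nil => simp [pvSpecNum]
  | cons w ws ih =>
    rw [List.length_cons, List.range_succ_eq_map, List.map_cons, List.map_map, pvSpecNum]
    simp only [List.cons.injEq]
    refine ⟨?_, ?_⟩
    · simp
    · rw [← ih (plows ++ [PySem.Str.lower w])]
      apply List.map_congr_left
      intro i _
      simp only [Function.comp_apply, List.getD_cons_succ, List.map_cons, List.take_succ_cons,
        List.count_cons, List.count_append]
      refine congrArg (fun z => PySem.Str.join "" [ws.getD i "", "#", PySem.Int.toStr z]) ?_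
      push_cast
      simp only [List.count_nil, Nat.cast_zero, Nat.succ_eq_add_one]
      ring

-- ===== VERDICT (by name: the statement is the Claim_ definition above) =====
theorem word_numeration_spec : Claim_equal_word_numeration := by
  intro words _
  unfold Spec_word_numeration word_numeration word_numeration_alt
  have hA := pv_A_inv words [] []
  simp only [PySem.Dict.counter, List.foldl_nil] at hA
  rw [hA]
  simp only [List.nil_append, PySem.List.len_eq, PySem.List.pyRange_zero_natCast, List.map_map]
  rw [← pv_B_inv words []]
  apply List.map_congr_left
  intro i hi
  simp only [Function.comp_apply, PySem.List.pyGetD_natCast]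
  have h1 : ((i : Int) + 1) = ((i + 1 : Nat) : Int) := by push_cast; ring
  rw [h1, PySem.List.slice_to_natCast, PySem.List.count_eq]
  simp
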